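-- pv_equiv track=rewrite | github.com/BQstudy/BQstudy-btc-trading-agent- | src/evolution/prompt_optimizer.py | _select_best_change
-- ===== SOURCE A (Python) =====
-- from typing import Dict, List, Optional, Any
--
-- def _select_best_change(changes: List[Dict]) -> Dict:
--     """选择最佳修改"""
--     if not changes:
--         return {}
--
--     # 按风险排序，选择风险最低的
--     changes_with_risk = []
--     for change in changes:
--         change_type = change.get("type", "")
--         if change_type == "minor_refine":
--             risk_score = 1
--         elif change_type == "add_step":
--             risk_score = 2
--         else:
--             risk_score = 3
--         changes_with_risk.append((risk_score, change))
--
--     changes_with_risk.sort(key=lambda x: x[0])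
--     return changes_with_risk[0][1]
-- ===== SOURCE B (Python) =====
-- def _select_best_change(changes):
--     """选择最佳修改"""
--     if not changes:
--         return {}
--     # priority passes instead of scoring + sorting: first 'minor_refine',
--     # else first 'add_step', else the first change
--     for change in changes:
--         if change.get("type", "") == "minor_refine":
--             return change
--     for change in changes:
--         if change.get("type", "") == "add_step":
--             return change
--     return changes[0]
-- ===== Notes on version B (the rewrite author's own statement) =====
-- stated objective: simpler
-- what changed: Replaces building a (risk, change) list and stably sorting it with two priority scans that return the first 'minor_refine', else the first 'add_step', else the first change.
import Mathlib
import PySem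

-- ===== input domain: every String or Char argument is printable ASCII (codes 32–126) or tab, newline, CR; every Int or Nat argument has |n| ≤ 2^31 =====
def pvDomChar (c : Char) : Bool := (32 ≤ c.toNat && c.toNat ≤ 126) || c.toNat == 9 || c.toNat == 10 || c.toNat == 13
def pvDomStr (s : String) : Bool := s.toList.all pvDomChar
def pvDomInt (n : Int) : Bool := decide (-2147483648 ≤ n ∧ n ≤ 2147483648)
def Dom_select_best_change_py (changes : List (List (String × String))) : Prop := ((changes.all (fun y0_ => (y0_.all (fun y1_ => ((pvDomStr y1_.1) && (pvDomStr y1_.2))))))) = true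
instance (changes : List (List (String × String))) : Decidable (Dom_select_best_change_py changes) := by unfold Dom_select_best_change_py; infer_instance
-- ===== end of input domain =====

-- B replaces A's scored-list-and-stable-sort with two linear priority scans (first 'minor_refine', else first 'add_step', else the first change); simpler, equal return value.


-- ===== PORT A =====
def select_best_change_py (changes : List (List (String × String))) : List (String × String) :=
  if changes = [] then []
  else
    -- 按风险排序，选择风险最低的
    let changes_with_risk : List (Int × List (String × String)) :=
      changes.foldl (fun acc change =>
        let change_type := (PySem.Dict.mk change).getD "type" ""
        let risk_score : Int :=
          if change_type == "minor_refine" then 1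
          else if change_type == "add_step" then 2
          else 3
        acc ++ [(risk_score, change)]) []
    match PySem.List.sorted changes_with_risk (fun x => x.1) false with
    | [] => []          -- unreachable: changes ≠ []
    | x :: _ => x.2

-- ===== PORT B =====
def select_best_change_py_alt (changes : List (List (String × String))) : List (String × String) :=
  match changes with
  | [] => []
  | c0 :: _ =>
    match changes.find? (fun c => (PySem.Dict.mk c).getD "type" "" == "minor_refine") with
    | some c => c
    | none =>
      match changes.find? (fun c => (PySem.Dict.mk c).getD "type" "" == "add_step") with
      | some c => c
      | none => c0

-- ===== PRECONDITION & SPEC =====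
def Spec_select_best_change_py (changes : List (List (String × String))) (out : List (String × String)) : Prop := out = select_best_change_py_alt changes
instance (changes : List (List (String × String))) (out : List (String × String)) : Decidable (Spec_select_best_change_py changes out) := by unfold Spec_select_best_change_py; infer_instance

-- ===== CLAIM (what is proved, stated in full; the proofs are below) =====
def Claim_equal_select_best_change_py : Prop := ∀ (changes : List (List (String × String))), Dom_select_best_change_py changes → Spec_select_best_change_py changes (select_best_change_py changes)

-- ===== LEMMAS AND PROOFS =====

-- proof helpers: A's risk score as a function, and the two type tests used by B
def pvIsMinor (c : List (String × String)) : Bool := (PySem.Dict.mk c).getD "type" "" == "minor_refine"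
def pvIsAdd (c : List (String × String)) : Bool := (PySem.Dict.mk c).getD "type" "" == "add_step"
def pvRisk (c : List (String × String)) : Int :=
  if pvIsMinor c then 1 else if pvIsAdd c then 2 else 3
-- running minimum step, keeping the earlier element on ties (strict <), as stable sort does
def pvStep (b c : List (String × String)) : List (String × String) :=
  if pvRisk c < pvRisk b then c else b

theorem pvIsMinor_eta : pvIsMinor = fun x => (PySem.Dict.mk x).getD "type" "" == "minor_refine" := rfl
theorem pvIsAdd_eta : pvIsAdd = fun x => (PySem.Dict.mk x).getD "type" "" == "add_step" := rfl

theorem pvRisk_ge_one (c : List (String × String)) : 1 ≤ pvRisk c := by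
  unfold pvRisk; split_ifs <;> norm_num

theorem pvRisk_of_minor {c : List (String × String)} (h : pvIsMinor c = true) : pvRisk c = 1 := by
  simp [pvRisk, h]

theorem pvRisk_ge_two {c : List (String × String)} (h : pvIsMinor c = false) : 2 ≤ pvRisk c := by
  simp only [pvRisk, h, Bool.false_eq_true, if_false]
  split_ifs <;> norm_num

theorem pvRisk_of_add {c : List (String × String)} (h1 : pvIsMinor c = false) (h2 : pvIsAdd c = true) :
    pvRisk c = 2 := by simp [pvRisk, h1, h2]

theorem pvRisk_of_other {c : List (String × String)} (h1 : pvIsMinor c = false) (h2 : pvIsAdd c = false) :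
    pvRisk c = 3 := by simp [pvRisk, h1, h2]

-- head of insertBy, in terms of the old head
theorem head?_insertBy {α : Type} (before : α → α → Bool) (x : α) (acc : List α) :
    (PySem.List.insertBy before x acc).head? =
      match acc with
      | [] => some x
      | h :: _ => if before x h then some x else some h := by
  cases acc with
  | nil => simp [PySem.List.insertBy]
  | cons h t =>
    simp only [PySem.List.insertBy]
    split_ifs <;> simp

-- the running-strict-minimum step over (risk, change) pairs
def pvOptStep (o : Option (Int × List (String × String))) (x : Int × List (String × String)) :
    Option (Int × List (String × String)) :=
  match o with
  | none => some x
  | some h => if decide (x.1 < h.1) = true then some x else some h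

-- head of the insertion-sort foldl = running strict minimum (Option accumulator)
theorem head?_foldl_insertBy' (xs acc : List (Int × List (String × String))) :
    (List.foldl (fun acc x =>
        PySem.List.insertBy (fun a b => decide (a.1 < b.1)) x acc) acc xs).head? =
      List.foldl pvOptStep acc.head? xs := by
  induction xs generalizing acc with
  | nil => rfl
  | cons x rest ih =>
    simp only [List.foldl]
    rw [ih, head?_insertBy]
    cases acc <;> rfl

-- running strict minimum over the mapped (risk, change) list = fold of pvStep over the changes
theorem foldl_min_map (xs : List (List (String × String))) (b : List (String × String)) :
    List.foldl pvOptStep (some (pvRisk b, b)) (xs.map (fun c => (pvRisk c, c))) =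
      some (pvRisk (xs.foldl pvStep b), xs.foldl pvStep b) := by
  induction xs generalizing b with
  | nil => rfl
  | cons c rest ih =>
    simp only [List.map, List.foldl, pvOptStep]
    by_cases h : pvRisk c < pvRisk b
    · rw [if_pos (by simpa using h), ih c]
      simp [pvStep, h]
    · rw [if_neg (by simpa using h), ih b]
      simp [pvStep, h]

theorem foldl_step_minor (xs : List (List (String × String))) (b : List (String × String))
    (hb : pvRisk b = 1) : xs.foldl pvStep b = b := by
  induction xs generalizing b with
  | nil => rfl
  | cons c rest ih =>
    have := pvRisk_ge_one c
    simp only [List.foldl, pvStep, hb]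
    rw [if_neg (by omega)]
    exact ih b hb

theorem foldl_step_add (xs : List (List (String × String))) (b : List (String × String))
    (hb : pvRisk b = 2) :
    xs.foldl pvStep b = (xs.find? pvIsMinor).getD b := by
  induction xs generalizing b with
  | nil => rfl
  | cons c rest ih =>
    by_cases hm : pvIsMinor c = true
    · have hr := pvRisk_of_minor hm
      simp only [List.foldl, pvStep, hb, hr]
      rw [if_pos (by omega), foldl_step_minor rest c hr, List.find?_cons_of_pos hm]
      rfl
    · have hm' : pvIsMinor c = false := by simpa using hm
      have := pvRisk_ge_two hm'
      simp only [List.foldl, pvStep, hb]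
      rw [if_neg (by omega), List.find?_cons_of_neg (by simp [hm'])]
      exact ih b hb

theorem foldl_step_other (xs : List (List (String × String))) (b : List (String × String))
    (hb : pvRisk b = 3) :
    xs.foldl pvStep b = ((xs.find? pvIsMinor).or (xs.find? pvIsAdd)).getD b := by
  induction xs generalizing b with
  | nil => rfl
  | cons c rest ih =>
    by_cases hm : pvIsMinor c = true
    · have hr := pvRisk_of_minor hm
      simp only [List.foldl, pvStep, hb, hr]
      rw [if_pos (by omega), foldl_step_minor rest c hr, List.find?_cons_of_pos hm]
      rfl
    · have hm' : pvIsMinor c = false := by simpa using hm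
      by_cases ha : pvIsAdd c = true
      · have hr := pvRisk_of_add hm' ha
        simp only [List.foldl, pvStep, hb, hr]
        rw [if_pos (by omega), foldl_step_add rest c hr,
          List.find?_cons_of_neg (by simp [hm']), List.find?_cons_of_pos ha]
        cases rest.find? pvIsMinor <;> rfl
      · have ha' : pvIsAdd c = false := by simpa using ha
        have hr := pvRisk_of_other hm' ha'
        simp only [List.foldl, pvStep, hb, hr]
        rw [if_neg (by omega), List.find?_cons_of_neg (by simp [hm']),
          List.find?_cons_of_neg (by simp [ha'])]
        exact ih b hb

-- A's accumulator loop builds the (risk, change) map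
theorem cw_eq_map (changes : List (List (String × String))) :
    changes.foldl (fun acc change =>
        let change_type := (PySem.Dict.mk change).getD "type" ""
        let risk_score : Int :=
          if change_type == "minor_refine" then 1
          else if change_type == "add_step" then 2
          else 3
        acc ++ [(risk_score, change)]) [] =
      changes.map (fun c => (pvRisk c, c)) := by
  induction changes using List.reverseRecOn with
  | nil => rfl
  | append_singleton rest c ih =>
    simp only [List.foldl_append, List.foldl, List.map_append, ih]
    rfl

-- head of A's sorted list, as a plain fold over the changes
theorem sorted_head (c : List (String × String)) (cs : List (List (String × String))) :
    (PySem.List.sorted ((c :: cs).map (fun x => (pvRisk x, x))) (fun x => x.1) false).head? =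
      some (pvRisk (cs.foldl pvStep c), cs.foldl pvStep c) := by
  rw [PySem.List.sorted_eq_foldl_insertBy, head?_foldl_insertBy']
  simp only [List.head?_nil, List.map, List.foldl]
  rw [show pvOptStep none (pvRisk c, c) = some (pvRisk c, c) from rfl]
  exact foldl_min_map cs c

theorem select_eq (changes : List (List (String × String))) :
    select_best_change_py changes = select_best_change_py_alt changes := by
  cases changes with
  | nil => rfl
  | cons c cs =>
    have hA : select_best_change_py (c :: cs) = cs.foldl pvStep c := by
      unfold select_best_change_py
      rw [if_neg (by simp)]
      simp only
      rw [cw_eq_map]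
      have hh := sorted_head c cs
      cases hs : PySem.List.sorted ((c :: cs).map (fun x => (pvRisk x, x))) (fun x => x.1) false with
      | nil => rw [hs] at hh; simp at hh
      | cons y t =>
        rw [hs] at hh
        simp only [List.head?] at hh
        have : y = (pvRisk (cs.foldl pvStep c), cs.foldl pvStep c) := by injection hh
        show y.2 = _
        rw [this]
    rw [hA]
    by_cases hm : pvIsMinor c = true
    · rw [foldl_step_minor cs c (pvRisk_of_minor hm)]
      simp only [select_best_change_py_alt]
      rw [List.find?_cons_of_pos (p := fun x => (PySem.Dict.mk x).getD "type" "" == "minor_refine") hm]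
    · have hm' : pvIsMinor c = false := by simpa using hm
      by_cases ha : pvIsAdd c = true
      · rw [foldl_step_add cs c (pvRisk_of_add hm' ha)]
        simp only [select_best_change_py_alt]
        rw [List.find?_cons_of_neg (p := fun x => (PySem.Dict.mk x).getD "type" "" == "minor_refine")
          (show ¬ pvIsMinor c = true by rw [hm']; exact Bool.false_ne_true)]
        rw [pvIsMinor_eta]
        cases hf : cs.find? (fun x => (PySem.Dict.mk x).getD "type" "" == "minor_refine") with
        | some m => rfl
        | none =>
          rw [List.find?_cons_of_pos (p := fun x => (PySem.Dict.mk x).getD "type" "" == "add_step") ha]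
          rfl
      · have ha' : pvIsAdd c = false := by simpa using ha
        rw [foldl_step_other cs c (pvRisk_of_other hm' ha')]
        simp only [select_best_change_py_alt]
        rw [List.find?_cons_of_neg (p := fun x => (PySem.Dict.mk x).getD "type" "" == "minor_refine")
            (show ¬ pvIsMinor c = true by rw [hm']; exact Bool.false_ne_true),
          List.find?_cons_of_neg (p := fun x => (PySem.Dict.mk x).getD "type" "" == "add_step")
            (show ¬ pvIsAdd c = true by rw [ha']; exact Bool.false_ne_true)]
        rw [pvIsMinor_eta, pvIsAdd_eta]
        cases hf : cs.find? (fun x => (PySem.Dict.mk x).getD "type" "" == "minor_refine") with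
        | some m => rfl
        | none =>
          cases hg : cs.find? (fun x => (PySem.Dict.mk x).getD "type" "" == "add_step") <;> rfl

-- ===== VERDICT (by name: the statement is the Claim_ definition above) =====
theorem select_best_change_py_spec : Claim_equal_select_best_change_py := by
  intro changes _
  exact select_eq changes
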